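-- pv_equiv track=rewrite | github.com/Balizero1987/Teman2 | apps/bali-intel-scraper/scripts/professional_scorer.py | calculate_geographic
-- ===== SOURCE A (Python) =====
-- GEOGRAPHIC = {
--     "bali_specific": {
--         "score": 100,
--         "keywords": [
--             "bali",
--             "denpasar",
--             "kuta",
--             "seminyak",
--             "canggu",
--             "ubud",
--             "sanur",
--             "nusa dua",
--             "uluwatu",
--             "jimbaran",
--             "badung",
--             "gianyar",
--             "tabanan",
--             "buleleng",
--             "karangasem",
--             "klungkung",
--             "bangli",
--             "ngurah rai",
--             "bali governor",
--             "gubernur bali",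
--         ],
--     },
--     "indonesia_wide": {
--         "score": 75,
--         "keywords": [
--             "indonesia",
--             "indonesian",
--             "jakarta",
--             "java",
--             "surabaya",
--             "bandung",
--             "yogyakarta",
--             "lombok",
--             "sumatra",
--             "sulawesi",
--             "kalimantan",
--             "papua",
--             "national",
--             "nasional",
--             "pemerintah indonesia",
--             "indonesian government",
--         ],
--     },
--     "southeast_asia": {
--         "score": 45,
--         "keywords": [
--             "asean",
--             "southeast asia",
--             "asia tenggara",
--             "singapore",
--             "malaysia",
--             "thailand",
--             "vietnam",
--             "philippines",
--             "regional",
--         ],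
--     },
-- }
--
-- def calculate_geographic(title: str, content: str) -> int:
--     """
--     Calculate geographic relevance score.
--     """
--     text = f"{title} {content}".lower()
--
--     # Check Bali-specific first
--     for keyword in GEOGRAPHIC["bali_specific"]["keywords"]:
--         if keyword in text:
--             return GEOGRAPHIC["bali_specific"]["score"]
--
--     # Check Indonesia-wide
--     for keyword in GEOGRAPHIC["indonesia_wide"]["keywords"]:
--         if keyword in text:
--             return GEOGRAPHIC["indonesia_wide"]["score"]
--
--     # Check Southeast Asia
--     for keyword in GEOGRAPHIC["southeast_asia"]["keywords"]:
--         if keyword in text: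
--             return GEOGRAPHIC["southeast_asia"]["score"]
--
--     return 25  # No geographic match
-- ===== SOURCE B (Python) =====
-- GEOGRAPHIC = {
--     "bali_specific": {
--         "score": 100,
--         "keywords": [
--             "bali", "denpasar", "kuta", "seminyak", "canggu", "ubud", "sanur",
--             "nusa dua", "uluwatu", "jimbaran", "badung", "gianyar", "tabanan",
--             "buleleng", "karangasem", "klungkung", "bangli", "ngurah rai",
--             "bali governor", "gubernur bali",
--         ],
--     },
--     "indonesia_wide": {
--         "score": 75,
--         "keywords": [
--             "indonesia", "indonesian", "jakarta", "java", "surabaya", "bandung",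
--             "yogyakarta", "lombok", "sumatra", "sulawesi", "kalimantan", "papua",
--             "national", "nasional", "pemerintah indonesia", "indonesian government",
--         ],
--     },
--     "southeast_asia": {
--         "score": 45,
--         "keywords": [
--             "asean", "southeast asia", "asia tenggara", "singapore", "malaysia",
--             "thailand", "vietnam", "philippines", "regional",
--         ],
--     },
-- }
--
--
-- def calculate_geographic(title: str, content: str) -> int:
--     """Calculate geographic relevance score (max over all matching tiers)."""
--     text = f"{title} {content}".lower()
--     scores = [tier["score"] for tier in GEOGRAPHIC.values()
--               if any(kw in text for kw in tier["keywords"])]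
--     return max(scores, default=25)
-- ===== Notes on version B (the rewrite author's own statement) =====
-- stated objective: alternative
-- what changed: Replaces the three sequential keyword loops with eager early return by one pass over GEOGRAPHIC.values() that collects the scores of ALL matching tiers and reduces with max(scores, default=25); correct because tier scores 100>75>45 descend in priority order.
import Mathlib
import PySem

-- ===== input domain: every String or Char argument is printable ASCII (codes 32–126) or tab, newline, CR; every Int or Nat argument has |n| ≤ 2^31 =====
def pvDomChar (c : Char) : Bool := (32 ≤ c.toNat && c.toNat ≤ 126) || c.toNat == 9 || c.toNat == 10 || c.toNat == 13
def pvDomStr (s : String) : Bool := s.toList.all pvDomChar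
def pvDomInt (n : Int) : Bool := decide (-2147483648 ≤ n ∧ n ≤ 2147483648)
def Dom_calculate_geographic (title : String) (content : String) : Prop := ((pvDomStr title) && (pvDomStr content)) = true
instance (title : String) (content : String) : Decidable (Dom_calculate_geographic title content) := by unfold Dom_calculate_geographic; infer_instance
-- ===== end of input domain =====

-- B replaces A's eager early-return priority scan with one pass collecting all matching tiers' scores and taking max(scores, default=25); correct since scores 100>75>45 descend in priority order.


-- shared module-level constant GEOGRAPHIC (keyword lists per tier)
def geoBaliKeywords : List String :=
  ["bali", "denpasar", "kuta", "seminyak", "canggu", "ubud", "sanur",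
   "nusa dua", "uluwatu", "jimbaran", "badung", "gianyar", "tabanan",
   "buleleng", "karangasem", "klungkung", "bangli", "ngurah rai",
   "bali governor", "gubernur bali"]

def geoIndoKeywords : List String :=
  ["indonesia", "indonesian", "jakarta", "java", "surabaya", "bandung",
   "yogyakarta", "lombok", "sumatra", "sulawesi", "kalimantan", "papua",
   "national", "nasional", "pemerintah indonesia", "indonesian government"]

def geoSeaKeywords : List String :=
  ["asean", "southeast asia", "asia tenggara", "singapore", "malaysia",
   "thailand", "vietnam", "philippines", "regional"]

-- ===== PORT A =====
-- A's `for keyword in …: if keyword in text: return score` loop: true on first match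
def geoScanA (kws : List String) (text : String) : Bool :=
  match kws with
  | [] => false
  | k :: rest => if PySem.Str.isIn k text then true else geoScanA rest text

def calculate_geographic (title : String) (content : String) : Int :=
  let text := PySem.Str.lower (title ++ " " ++ content)
  if geoScanA geoBaliKeywords text then 100
  else if geoScanA geoIndoKeywords text then 75
  else if geoScanA geoSeaKeywords text then 45
  else 25

-- ===== PORT B =====
-- GEOGRAPHIC.values() as (score, keywords) pairs, in insertion order
def geoTiers : List (Int × List String) :=
  [(100, geoBaliKeywords), (75, geoIndoKeywords), (45, geoSeaKeywords)]

def calculate_geographic_alt (title : String) (content : String) : Int :=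
  let text := PySem.Str.lower (title ++ " " ++ content)
  let scores := (geoTiers.filter
    (fun tier => tier.2.any (fun kw => PySem.Str.isIn kw text))).map (fun tier => tier.1)
  match PySem.List.max? scores (fun x => x) with
  | some m => m
  | none => 25

-- ===== PRECONDITION & SPEC =====
def Spec_calculate_geographic (title : String) (content : String) (out : Int) : Prop := out = calculate_geographic_alt title content
instance (title : String) (content : String) (out : Int) : Decidable (Spec_calculate_geographic title content out) := by unfold Spec_calculate_geographic; infer_instance

-- ===== CLAIM (what is proved, stated in full; the proofs are below) =====
def Claim_equal_calculate_geographic : Prop := ∀ (title : String) (content : String), Dom_calculate_geographic title content → Spec_calculate_geographic title content (calculate_geographic title content)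

-- ===== LEMMAS AND PROOFS =====
-- A's first-match loop over a tier equals List.any of the membership test
theorem geoScanA_eq_any (kws : List String) (text : String) :
    geoScanA kws text = kws.any (fun kw => PySem.Str.isIn kw text) := by
  induction kws with
  | nil => rfl
  | cons k rest ih =>
    simp only [geoScanA, List.any_cons]
    by_cases h : PySem.Str.isIn k text = true <;> simp [ih]

-- ===== VERDICT (by name: the statement is the Claim_ definition above) =====
theorem calculate_geographic_spec : Claim_equal_calculate_geographic := by
  intro title content _
  unfold Spec_calculate_geographic calculate_geographic calculate_geographic_alt geoTiers
  simp only [geoScanA_eq_any]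
  set text := PySem.Str.lower (title ++ " " ++ content) with htext
  cases hb : geoBaliKeywords.any (fun kw => PySem.Str.isIn kw text) <;>
  cases hi : geoIndoKeywords.any (fun kw => PySem.Str.isIn kw text) <;>
  cases hs : geoSeaKeywords.any (fun kw => PySem.Str.isIn kw text) <;>
    simp only [List.filter_cons, List.filter_nil, hb, hi, hs, if_true, if_false,
      Bool.false_eq_true, List.map, PySem.List.max?, List.foldl] <;> rfl
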